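-- pv_equiv track=rewrite | github.com/OZestina/TheGreatestGrace | codingTest/programmers/py/230213_불량사용자.py | find_banned_list
-- ===== SOURCE A (Python) =====
-- def find_banned_list(user_id, banned):
--     result = []
--     for id in user_id:
--         if len(id) == len(banned):
--             not_equal = False
--             for i in range(len(id)):
--                 if banned[i] != "*" and id[i] != banned[i]:
--                     not_equal = True
--                     break
--             if not not_equal:
--                 result.append(id)
--     return result
-- ===== SOURCE B (Python) =====
-- def find_banned_list(user_id, banned):
--     # staged sieve: one pass per non-wildcard pattern position, filtering
--     # the candidate list, instead of a per-id inner character loop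
--     cand = [uid for uid in user_id if len(uid) == len(banned)]
--     for i, c in enumerate(banned):
--         if c != '*':
--             cand = [uid for uid in cand if uid[i] == c]
--     return cand
-- ===== Notes on version B (the rewrite author's own statement) =====
-- stated objective: alternative
-- what changed: A makes a single pass over the ids with an inner per-character loop and a break flag; B inverts the loop order into a staged sieve: it first keeps the ids of the right length, then for each non-wildcard pattern position makes a separate filtering pass over the shrinking candidate list.
import Mathlib
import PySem

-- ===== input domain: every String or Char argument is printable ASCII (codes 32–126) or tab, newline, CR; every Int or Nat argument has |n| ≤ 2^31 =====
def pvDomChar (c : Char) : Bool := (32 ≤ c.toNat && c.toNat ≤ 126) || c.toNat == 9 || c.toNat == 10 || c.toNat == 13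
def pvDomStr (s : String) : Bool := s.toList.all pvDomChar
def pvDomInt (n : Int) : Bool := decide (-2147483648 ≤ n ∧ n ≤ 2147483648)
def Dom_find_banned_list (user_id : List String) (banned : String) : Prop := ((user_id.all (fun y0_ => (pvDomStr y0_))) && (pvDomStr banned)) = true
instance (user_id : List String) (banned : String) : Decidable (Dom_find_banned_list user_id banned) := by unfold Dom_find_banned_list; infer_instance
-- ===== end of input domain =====

-- B inverts A's loop order: instead of one pass over the ids with an inner
-- per-character loop and a break flag, it runs a staged sieve — keep the ids of
-- the right length, then one filtering pass over the shrinking candidate list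
-- per non-wildcard pattern position (objective: alternative).

-- ===== PORT A =====
-- A's inner 'for i in range(len(id)) … break': recursion over the two char lists
-- in step (returns the final value of not_equal; 'break' = return true).
def notEqualLoop : List Char → List Char → Bool
  | b :: bs, c :: cs => if b ≠ '*' && c ≠ b then true else notEqualLoop bs cs
  | _, _ => false

def find_banned_list (user_id : List String) (banned : String) : List String :=
  user_id.foldl (fun result id =>
    if id.toList.length = banned.toList.length then
      if ¬ (notEqualLoop banned.toList id.toList) then result ++ [id] else result
    else result) []

-- ===== PORT B =====
-- 'for i, c in enumerate(banned): if c != '*': cand = [uid … if uid[i] == c]'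
-- as a foldl over the enumerated pattern whose state is the candidate list.
def find_banned_list_alt (user_id : List String) (banned : String) : List String :=
  let cand := user_id.filter (fun uid => uid.toList.length == banned.toList.length)
  (PySem.List.enumerate banned.toList).foldl
    (fun cand p =>
      if p.2 ≠ '*' then
        cand.filter (fun uid => PySem.List.pyGet? uid.toList p.1 == some p.2)
      else cand)
    cand

-- ===== PRECONDITION & SPEC =====
def Spec_find_banned_list (user_id : List String) (banned : String) (out : List String) : Prop := out = find_banned_list_alt user_id banned
instance (user_id : List String) (banned : String) (out : List String) : Decidable (Spec_find_banned_list user_id banned out) := by unfold Spec_find_banned_list; infer_instance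

-- ===== CLAIM (what is proved, stated in full; the proofs are below) =====
def Claim_equal_find_banned_list : Prop := ∀ (user_id : List String) (banned : String), Dom_find_banned_list user_id banned → Spec_find_banned_list user_id banned (find_banned_list user_id banned)

-- ===== LEMMAS AND PROOFS =====

-- common characterisation of a matching id
def Good (bs cs : List Char) : Prop :=
  ∀ (k : Nat) (hb : k < bs.length) (hc : k < cs.length), bs[k] ≠ '*' → cs[k] = bs[k]

theorem notEqualLoop_eq_false_iff (bs cs : List Char) :
    notEqualLoop bs cs = false ↔ Good bs cs := by
  induction bs generalizing cs with
  | nil => simp [notEqualLoop, Good]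
  | cons b bs ih =>
    cases cs with
    | nil => simp [notEqualLoop, Good]
    | cons c cs =>
      simp only [notEqualLoop]
      by_cases h : (b ≠ '*' && c ≠ b) = true
      · rw [if_pos h]
        simp only [Bool.and_eq_true, ne_eq, decide_eq_true_eq] at h
        constructor
        · intro hf; exact absurd hf (by simp)
        · intro hg; exact absurd (hg 0 (by simp) (by simp) (by simpa using h.1)) (by simpa using h.2)
      · rw [if_neg h, ih]
        simp only [Bool.and_eq_true, ne_eq, decide_eq_true_eq, not_and, not_not] at h
        constructor
        · intro hg k hk1 hk2 hne
          cases k with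
          | zero =>
            simp only [List.getElem_cons_zero] at hne ⊢
            exact h hne
          | succ k => simpa using hg k (by simpa using hk1) (by simpa using hk2) (by simpa using hne)
        · intro hg k hk1 hk2 hne
          simpa using hg (k + 1) (by simpa using hk1) (by simpa using hk2) (by simpa using hne)

-- the staged sieve is one filter by the conjunction of all stage predicates
theorem sieve_eq_filter (ps : List (Int × Char)) (cand : List String) :
    ps.foldl (fun cand p =>
        if p.2 ≠ '*' then
          cand.filter (fun uid => PySem.List.pyGet? uid.toList p.1 == some p.2)
        else cand) cand
    = cand.filter (fun uid =>
        ps.all (fun p => !(decide (p.2 ≠ '*')) || (PySem.List.pyGet? uid.toList p.1 == some p.2))) := by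
  induction ps generalizing cand with
  | nil => simp
  | cons p ps ih =>
    simp only [List.foldl_cons, ih]
    by_cases h : p.2 = '*'
    · simp [h]
    · rw [if_pos (by simpa using h), List.filter_filter]
      apply List.filter_congr
      intro uid _
      simp [h, Bool.and_comm]

theorem alt_pred_iff (bs cs : List Char) :
    (bs.length = cs.length) →
    ((PySem.List.enumerate bs).all
        (fun p => !(decide (p.2 ≠ '*')) || (PySem.List.pyGet? cs p.1 == some p.2)) = true ↔
      Good bs cs) := by
  intro hlen
  simp only [List.all_eq_true, PySem.List.mem_enumerate_iff, Good]
  constructor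
  · intro h k hb hc hne
    have := h ((k : Int), bs[k]) ⟨k, hb, by simp⟩
    simp only [Bool.or_eq_true, Bool.not_eq_true', decide_eq_false_iff_not, not_not,
      beq_iff_eq] at this
    have h2 := this.resolve_left (by simpa using hne)
    rw [PySem.List.pyGet?_natCast] at h2
    simpa [List.getElem?_eq_getElem hc] using h2
  · rintro h p ⟨k, hk, rfl⟩
    simp only [Bool.or_eq_true, Bool.not_eq_true', decide_eq_false_iff_not, not_not, beq_iff_eq]
    by_cases hne : bs[k] = '*'
    · exact Or.inl hne
    · refine Or.inr ?_
      have hc : k < cs.length := by omega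
      rw [zero_add, PySem.List.pyGet?_natCast]
      simp [List.getElem?_eq_getElem hc, h k hk hc hne]

theorem find_banned_list_eq (user_id : List String) (banned : String) :
    find_banned_list user_id banned = find_banned_list_alt user_id banned := by
  unfold find_banned_list find_banned_list_alt
  rw [show (fun result id =>
      if id.toList.length = banned.toList.length then
        if ¬ (notEqualLoop banned.toList id.toList) then result ++ [id] else result
      else result)
    = (fun (result : List String) id =>
        if (decide (id.toList.length = banned.toList.length) && !(notEqualLoop banned.toList id.toList)) then result ++ [id] else result) from by
      funext result id
      by_cases h1 : id.toList.length = banned.toList.length <;> by_cases h2 : notEqualLoop banned.toList id.toList <;> simp [h1, h2]]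
  rw [PySem.List.foldl_append_if_eq_filter, sieve_eq_filter, List.filter_filter]
  simp only [List.nil_append]
  apply List.filter_congr
  intro uid _
  rw [Bool.eq_iff_iff]
  simp only [Bool.and_eq_true, decide_eq_true_eq, Bool.not_eq_true', beq_iff_eq,
    notEqualLoop_eq_false_iff]
  constructor
  · rintro ⟨hlen, hg⟩
    exact ⟨(alt_pred_iff _ _ (by omega)).mpr hg, hlen⟩
  · rintro ⟨hall, hlen⟩
    exact ⟨hlen, (alt_pred_iff _ _ (by omega)).mp hall⟩

-- ===== VERDICT (by name: the statement is the Claim_ definition above) =====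
theorem find_banned_list_spec : Claim_equal_find_banned_list := by
  intro user_id banned _
  exact find_banned_list_eq user_id banned
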